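-- pv_equiv track=rewrite | github.com/zaclake/book-writer-automated-platform | backend/auto_complete/helpers/skeleton_expand.py | extract_voice_profiles
-- ===== SOURCE A (Python) =====
-- from typing import Any, Dict, List
--
-- def extract_voice_profiles(character_reference: str, max_chars: int = 2000) -> str:
--     """Extract voice/speech/dialogue sections from a character reference file.
--
--     Character files typically have physical descriptions at the top and voice
--     profiles deeper in. This function prioritizes the voice-relevant content.
--     """
--     if not character_reference:
--         return ""
--
--     voice_markers = [
--         "voice", "speech", "dialogue", "speaking", "communication",
--         "verbal", "manner of speaking", "catchphrase", "vocabulary",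
--         "contractions", "accent", "tone", "diction",
--     ]
--
--     lines = character_reference.split("\n")
--     voice_sections: List[str] = []
--     in_voice_section = False
--     current_section: List[str] = []
--
--     for line in lines:
--         lower = line.lower().strip()
--         # Detect section headers that relate to voice
--         is_header = lower.startswith("#") or lower.startswith("**")
--         if is_header and any(marker in lower for marker in voice_markers):
--             if current_section and in_voice_section:
--                 voice_sections.append("\n".join(current_section))
--             current_section = [line]
--             in_voice_section = True
--         elif is_header and in_voice_section:
--             voice_sections.append("\n".join(current_section))
--             current_section = [line]
--             in_voice_section = False
--         elif in_voice_section: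
--             current_section.append(line)
--
--     if current_section and in_voice_section:
--         voice_sections.append("\n".join(current_section))
--
--     if voice_sections:
--         result = "\n\n".join(voice_sections)
--         return result[:max_chars]
--
--     # Fallback: return the latter half of the file (where voice profiles usually live)
--     midpoint = len(character_reference) // 2
--     return character_reference[midpoint:midpoint + max_chars]
-- ===== SOURCE B (Python) =====
-- def extract_voice_profiles(character_reference: str, max_chars: int = 2000) -> str:
--     """Two-level scan: an outer cursor walks the lines; on a voice header an
--     inner scan consumes the section body up to the next header, replacing A's
--     in_voice_section/current_section state machine."""
--     if not character_reference:
--         return ""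
--
--     voice_markers = [
--         "voice", "speech", "dialogue", "speaking", "communication",
--         "verbal", "manner of speaking", "catchphrase", "vocabulary",
--         "contractions", "accent", "tone", "diction",
--     ]
--
--     def _is_header(line):
--         lw = line.lower().strip()
--         return lw.startswith("#") or lw.startswith("**")
--
--     def _is_voice_header(line):
--         lw = line.lower().strip()
--         return (lw.startswith("#") or lw.startswith("**")) and any(
--             m in lw for m in voice_markers
--         )
--
--     lines = character_reference.split("\n")
--     n = len(lines)
--     sections = []
--     i = 0
--     while i < n:
--         line = lines[i]
--         i += 1
--         if _is_voice_header(line):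
--             start = i
--             while i < n and not _is_header(lines[i]):
--                 i += 1
--             sections.append("\n".join([line] + lines[start:i]))
--
--     if sections:
--         return "\n\n".join(sections)[:max_chars]
--
--     midpoint = len(character_reference) // 2
--     return character_reference[midpoint:midpoint + max_chars]
-- ===== Notes on version B (the rewrite author's own statement) =====
-- stated objective: alternative
-- what changed: Replaced A's single-pass in_voice_section/current_section state machine with a two-level scan: an outer cursor finds voice headers and an inner scan consumes each section body up to the next header.
import Mathlib
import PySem

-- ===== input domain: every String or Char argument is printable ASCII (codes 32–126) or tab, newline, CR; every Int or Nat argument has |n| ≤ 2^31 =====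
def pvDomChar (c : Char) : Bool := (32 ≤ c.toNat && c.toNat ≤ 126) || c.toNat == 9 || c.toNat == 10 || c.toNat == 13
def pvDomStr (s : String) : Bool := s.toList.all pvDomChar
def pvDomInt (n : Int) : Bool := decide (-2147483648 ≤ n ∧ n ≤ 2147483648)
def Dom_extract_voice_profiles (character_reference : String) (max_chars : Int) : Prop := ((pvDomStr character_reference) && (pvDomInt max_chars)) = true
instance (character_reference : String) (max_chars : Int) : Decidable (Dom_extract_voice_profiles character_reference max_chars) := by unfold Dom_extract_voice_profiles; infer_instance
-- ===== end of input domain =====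

-- B replaces A's running in_voice_section/current_section state machine by a two-level scan
-- (outer cursor over lines, inner scan collecting a section body up to the next header); same cost.

-- ===== PORT A =====
def pvVoiceMarkers : List String :=
  ["voice", "speech", "dialogue", "speaking", "communication",
   "verbal", "manner of speaking", "catchphrase", "vocabulary",
   "contractions", "accent", "tone", "diction"]

-- line.lower().strip()
def pvLower (line : String) : String := PySem.Str.strip (PySem.Str.lower line)

-- lower.startswith("#") or lower.startswith("**")
def pvHeaderOfLower (lower : String) : Bool :=
  PySem.Str.startswith lower "#" || PySem.Str.startswith lower "**"

-- any(marker in lower for marker in voice_markers)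
def pvVoiceOfLower (lower : String) : Bool :=
  pvVoiceMarkers.any (fun m => PySem.Str.isIn m lower)

-- the body of A's for loop, state = (voice_sections, in_voice_section, current_section)
def pvStepA (st : List String × Bool × List String) (line : String) :
    List String × Bool × List String :=
  match st with
  | (secs, inv, cur) =>
    let lower := pvLower line
    let isHeader := pvHeaderOfLower lower
    if isHeader && pvVoiceOfLower lower then
      ((if !cur.isEmpty && inv then secs ++ [PySem.Str.join "\n" cur] else secs), true, [line])
    else if isHeader && inv then
      (secs ++ [PySem.Str.join "\n" cur], false, [line])
    else if inv then
      (secs, inv, cur ++ [line])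
    else
      (secs, inv, cur)

-- the flush after the loop
def pvFlushA (st : List String × Bool × List String) : List String :=
  match st with
  | (secs, inv, cur) => if !cur.isEmpty && inv then secs ++ [PySem.Str.join "\n" cur] else secs

def extract_voice_profiles (character_reference : String) (max_chars : Int) : String :=
  if character_reference = "" then ""
  else
    let lines := (PySem.Str.split? character_reference "\n").getD []
    let voice_sections := pvFlushA (lines.foldl pvStepA ([], false, []))
    if !voice_sections.isEmpty then
      PySem.Str.slice (PySem.Str.join "\n\n" voice_sections) none (some max_chars)
    else
      let midpoint := PySem.Int.floordiv (PySem.Str.len character_reference) 2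
      PySem.Str.slice character_reference (some midpoint) (some (midpoint + max_chars))

-- ===== PORT B =====
def pvIsHeaderB (line : String) : Bool := pvHeaderOfLower (pvLower line)

def pvIsVoiceHeaderB (line : String) : Bool :=
  pvHeaderOfLower (pvLower line) && pvVoiceOfLower (pvLower line)

-- outer scan; on a voice header the inner scan (takeWhile) collects the body up to the next header
def pvSectionsB : List String → List String
  | [] => []
  | l :: rest =>
    if pvIsVoiceHeaderB l then
      PySem.Str.join "\n" (l :: rest.takeWhile (fun x => !pvIsHeaderB x)) ::
        pvSectionsB (rest.drop (rest.takeWhile (fun x => !pvIsHeaderB x)).length)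
    else
      pvSectionsB rest
termination_by ls => ls.length
decreasing_by
  · simp only [List.length_cons, List.length_drop]; omega
  · simp

def extract_voice_profiles_alt (character_reference : String) (max_chars : Int) : String :=
  if character_reference = "" then ""
  else
    let lines := (PySem.Str.split? character_reference "\n").getD []
    let sections := pvSectionsB lines
    if !sections.isEmpty then
      PySem.Str.slice (PySem.Str.join "\n\n" sections) none (some max_chars)
    else
      let midpoint := PySem.Int.floordiv (PySem.Str.len character_reference) 2
      PySem.Str.slice character_reference (some midpoint) (some (midpoint + max_chars))

-- ===== PRECONDITION & SPEC =====
def Spec_extract_voice_profiles (character_reference : String) (max_chars : Int) (out : String) : Prop := out = extract_voice_profiles_alt character_reference max_chars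
instance (character_reference : String) (max_chars : Int) (out : String) : Decidable (Spec_extract_voice_profiles character_reference max_chars out) := by unfold Spec_extract_voice_profiles; infer_instance

-- ===== CLAIM (what is proved, stated in full; the proofs are below) =====
def Claim_equal_extract_voice_profiles : Prop := ∀ (character_reference : String) (max_chars : Int), Dom_extract_voice_profiles character_reference max_chars → Spec_extract_voice_profiles character_reference max_chars (extract_voice_profiles character_reference max_chars)

-- ===== LEMMAS AND PROOFS =====

-- equation lemmas for the well-founded pvSectionsB
lemma pvSectionsB_nil : pvSectionsB [] = [] := by
  rw [pvSectionsB.eq_def]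

lemma pvSectionsB_cons (l : String) (t : List String) :
    pvSectionsB (l :: t) =
      if pvIsVoiceHeaderB l then
        PySem.Str.join "\n" (l :: t.takeWhile (fun x => !pvIsHeaderB x)) ::
          pvSectionsB (t.drop (t.takeWhile (fun x => !pvIsHeaderB x)).length)
      else pvSectionsB t := by
  rw [pvSectionsB.eq_def]

-- the loop invariant: A's fold, flushed, computes B's section list
lemma pvLoopA_eq (ls : List String) :
    (∀ secs cur, cur ≠ [] →
      pvFlushA (ls.foldl pvStepA (secs, true, cur)) =
        secs ++ [PySem.Str.join "\n" (cur ++ ls.takeWhile (fun x => !pvIsHeaderB x))] ++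
          pvSectionsB (ls.drop (ls.takeWhile (fun x => !pvIsHeaderB x)).length))
  ∧ (∀ secs cur,
      pvFlushA (ls.foldl pvStepA (secs, false, cur)) = secs ++ pvSectionsB ls) := by
  induction ls with
  | nil =>
    constructor
    · intro secs cur hcur
      simp [pvFlushA, pvSectionsB_nil, hcur]
    · intro secs cur
      simp [pvFlushA, pvSectionsB_nil]
  | cons l t ih =>
    obtain ⟨ihT, ihF⟩ := ih
    rcases Bool.eq_false_or_eq_true (pvIsHeaderB l) with hh | hh
    · have hh' : pvHeaderOfLower (pvLower l) = true := hh
      rcases Bool.eq_false_or_eq_true (pvVoiceOfLower (pvLower l)) with hw | hw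
      · -- voice header
        have hv : pvIsVoiceHeaderB l = true := by
          simp [pvIsVoiceHeaderB, hh', hw]
        constructor
        · intro secs cur hcur
          have hstep : pvStepA (secs, true, cur) l =
              (secs ++ [PySem.Str.join "\n" cur], true, [l]) := by
            simp only [pvStepA]
            simp [hh', hw, hcur]
          rw [List.foldl_cons, hstep, ihT (secs ++ [PySem.Str.join "\n" cur]) [l] (by simp)]
          simp [List.takeWhile_cons, hh, pvSectionsB_cons, hv]
        · intro secs cur
          have hstep : pvStepA (secs, false, cur) l = (secs, true, [l]) := by
            simp only [pvStepA]
            simp [hh', hw]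
          rw [List.foldl_cons, hstep, ihT secs [l] (by simp)]
          simp [List.takeWhile_cons, hh, pvSectionsB_cons, hv]
      · -- non-voice header
        have hv : pvIsVoiceHeaderB l = false := by
          simp [pvIsVoiceHeaderB, hw]
        constructor
        · intro secs cur hcur
          have hstep : pvStepA (secs, true, cur) l =
              (secs ++ [PySem.Str.join "\n" cur], false, [l]) := by
            simp only [pvStepA]
            simp [hh', hw]
          rw [List.foldl_cons, hstep, ihF (secs ++ [PySem.Str.join "\n" cur]) [l]]
          simp [List.takeWhile_cons, hh, pvSectionsB_cons, hv]
        · intro secs cur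
          have hstep : pvStepA (secs, false, cur) l = (secs, false, cur) := by
            simp only [pvStepA]
            simp [hh', hw]
          rw [List.foldl_cons, hstep, ihF secs cur]
          rw [pvSectionsB_cons]
          simp [hv]

    · -- not a header
      have hh' : pvHeaderOfLower (pvLower l) = false := hh
      have hv : pvIsVoiceHeaderB l = false := by
        simp [pvIsVoiceHeaderB, hh']
      constructor
      · intro secs cur hcur
        have hstep : pvStepA (secs, true, cur) l = (secs, true, cur ++ [l]) := by
          simp only [pvStepA]
          simp [hh']
        rw [List.foldl_cons, hstep, ihT secs (cur ++ [l]) (by simp)]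
        simp [List.takeWhile_cons, hh, List.drop_succ_cons]
      · intro secs cur
        have hstep : pvStepA (secs, false, cur) l = (secs, false, cur) := by
          simp only [pvStepA]
          simp [hh']
        rw [List.foldl_cons, hstep, ihF secs cur]
        rw [pvSectionsB_cons]
        simp [hv]

lemma pvSectionsA_eq (ls : List String) :
    pvFlushA (ls.foldl pvStepA ([], false, [])) = pvSectionsB ls := by
  simpa using (pvLoopA_eq ls).2 [] []

-- ===== VERDICT (by name: the statement is the Claim_ definition above) =====
theorem extract_voice_profiles_spec : Claim_equal_extract_voice_profiles := by
  intro cr mc _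
  unfold Spec_extract_voice_profiles extract_voice_profiles extract_voice_profiles_alt
  by_cases h : cr = ""
  · simp [h]
  · simp only [h, if_false]
    rw [pvSectionsA_eq]
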